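-- pv_equiv track=rewrite | github.com/s1Sharp/kpfu_parser | maks.py | clear_parsing_info
-- ===== SOURCE A (Python) =====
-- def clear_parsing_info(res):  # clear from any symbols
--     bad_chars = [';', ':', '!', "*", ".", "\\", "/", "-", "\t", "\r", "\n", "\ufeff", "\xa0"]
--     ans = []
--
--     for current in res:
--         for char in bad_chars:
--             current = current.replace(char, "")
--         if current != "":
--             ans.append(current)
--     return ans
-- ===== SOURCE B (Python) =====
-- def clear_parsing_info(res):  # clear from any symbols
--     bad = set(';:!*.\\/-\t\r\n\ufeff\xa0')
--     cleaned = (''.join(c for c in s if c not in bad) for s in res)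
--     return [t for t in cleaned if t != ""]
-- ===== Notes on version B (the rewrite author's own statement) =====
-- stated objective: idiomatic
-- what changed: A runs 13 full-string replace passes per string; B makes one character-level pass per string, keeping only characters outside a precomputed bad-character set, then keeps the non-empty results.
import Mathlib
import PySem

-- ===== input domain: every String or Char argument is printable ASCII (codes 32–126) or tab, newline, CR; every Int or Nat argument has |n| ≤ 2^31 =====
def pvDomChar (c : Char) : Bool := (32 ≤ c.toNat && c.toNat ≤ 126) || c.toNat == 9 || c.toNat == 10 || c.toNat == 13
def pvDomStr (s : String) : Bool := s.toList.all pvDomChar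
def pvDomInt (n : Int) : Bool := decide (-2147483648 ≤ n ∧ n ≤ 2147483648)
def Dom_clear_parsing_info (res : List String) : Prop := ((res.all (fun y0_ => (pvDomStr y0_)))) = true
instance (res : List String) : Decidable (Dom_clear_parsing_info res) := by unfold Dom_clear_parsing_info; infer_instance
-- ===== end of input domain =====

-- B differs from A by making one character-level filtering pass per string instead of 13 replace passes (idiomatic); return values proved equal.

-- ===== PORT A =====
def pvBadStrs : List String := [";", ":", "!", "*", ".", "\\", "/", "-", "\t", "\r", "\n", "\uFEFF", "\u00A0"]

def clear_parsing_info (res : List String) : List String :=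
  res.foldl (fun ans current0 =>
    let current := pvBadStrs.foldl (fun cur ch => PySem.Str.replace cur ch "") current0
    if current ≠ "" then ans ++ [current] else ans) []

-- ===== PORT B =====
def pvBadChars : List Char := [';', ':', '!', '*', '.', '\\', '/', '-', '\t', '\r', '\n', '\uFEFF', '\u00A0']

def clear_parsing_info_alt (res : List String) : List String :=
  (res.map (fun s => String.ofList (s.toList.filter (fun c => !pvBadChars.contains c)))).filter
    (fun t => t ≠ "")

-- ===== PRECONDITION & SPEC =====
def Spec_clear_parsing_info (res : List String) (out : List String) : Prop := out = clear_parsing_info_alt res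
instance (res : List String) (out : List String) : Decidable (Spec_clear_parsing_info res out) := by unfold Spec_clear_parsing_info; infer_instance

-- ===== CLAIM (what is proved, stated in full; the proofs are below) =====
def Claim_equal_clear_parsing_info : Prop := ∀ (res : List String), Dom_clear_parsing_info res → Spec_clear_parsing_info res (clear_parsing_info res)

-- ===== LEMMAS AND PROOFS =====

-- replace.go with a one-char pattern and empty replacement is a filter
theorem replace_go_single (c : Char) (l acc : List Char) (fuel : Nat) (h : l.length ≤ fuel) :
    PySem.Chars.replace.go [c] [] fuel l acc = acc.reverse ++ l.filter (fun x => x != c) := by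
  induction l generalizing fuel acc with
  | nil =>
      cases fuel with
      | zero => simp [PySem.Chars.replace.go]
      | succ f => simp [PySem.Chars.replace.go]
  | cons c' t ih =>
      cases fuel with
      | zero => simp at h
      | succ f =>
          rw [PySem.Chars.replace.go]
          have hp : ([c].isPrefixOf (c' :: t)) = (c == c') := by
            simp [List.isPrefixOf]
          rw [hp]
          by_cases hc : c = c'
          · subst hc
            simp only [beq_self_eq_true, if_pos, List.length_cons, List.length_nil,
              List.drop_succ_cons, List.drop_zero, List.reverse_nil, List.nil_append]
            rw [ih acc f (by simpa using Nat.succ_le_succ_iff.mp h)]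
            simp
          · have hb : (c == c') = false := by simpa using hc
            rw [hb]
            simp only [Bool.false_eq_true, if_false]
            rw [ih (c' :: acc) f (by simpa using Nat.succ_le_succ_iff.mp h)]
            have : (c' != c) = true := by simpa using fun h' => hc h'.symm
            simp [this]

theorem replace_single (c : Char) (l : List Char) :
    PySem.Chars.replace l [c] [] = l.filter (fun x => x != c) := by
  rw [PySem.Chars.replace]
  simp only [List.isEmpty_cons, if_false, Bool.false_eq_true]
  simpa using replace_go_single c l [] l.length le_rfl

-- folding one-char replaces over a char list is one combined filter
theorem fold_replace (bad : List Char) (s : String) :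
    (List.foldl (fun cur ch => PySem.Str.replace cur ch "") s
        (bad.map (fun c => String.ofList [c]))).toList
      = s.toList.filter (fun x => !bad.contains x) := by
  induction bad generalizing s with
  | nil => simp
  | cons c rest ih =>
      simp only [List.map_cons, List.foldl_cons]
      rw [ih (PySem.Str.replace s (String.ofList [c]) "")]
      have h1 : (PySem.Str.replace s (String.ofList [c]) "").toList = s.toList.filter (fun x => x != c) := by
        rw [PySem.Str.toList_replace]
        simpa [String.toList_ofList] using replace_single c s.toList
      rw [h1, List.filter_filter]
      apply List.filter_congr
      intro x _
      by_cases hx : x = c <;> simp [hx]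

theorem badStrs_eq : pvBadStrs = pvBadChars.map (fun c => String.ofList [c]) := by decide

theorem clean_eq (s : String) :
    pvBadStrs.foldl (fun cur ch => PySem.Str.replace cur ch "") s
      = String.ofList (s.toList.filter (fun c => !pvBadChars.contains c)) := by
  apply String.ext
  rw [badStrs_eq, fold_replace]
  simp [String.toList_ofList]

theorem loop_eq (res : List String) (ans : List String) :
    res.foldl (fun ans current0 =>
        let current := pvBadStrs.foldl (fun cur ch => PySem.Str.replace cur ch "") current0
        if current ≠ "" then ans ++ [current] else ans) ans
      = ans ++ (res.map (fun s => String.ofList (s.toList.filter (fun c => !pvBadChars.contains c)))).filter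
          (fun t => t ≠ "") := by
  induction res generalizing ans with
  | nil => simp
  | cons s rest ih =>
      simp only [List.foldl_cons, List.map_cons, List.filter_cons]
      rw [clean_eq, ih]
      split_ifs with h1 h2 <;> simp_all

-- ===== VERDICT (by name: the statement is the Claim_ definition above) =====
theorem clear_parsing_info_spec : Claim_equal_clear_parsing_info := by
  intro res _
  unfold Spec_clear_parsing_info clear_parsing_info clear_parsing_info_alt
  simpa using loop_eq res []
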